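-- pv_equiv track=rewrite | github.com/ungureancatalina/UBB--FMI | AN_1/SEM_1/FP/lab_3/ex.py | proprietatea2
-- ===== SOURCE A (Python) =====
-- def proprietatea2(lst):
--     secventa=[]
--     lungime_maxima=0
--     pozitie_x=0
--     poz_initiala=0
--     x=lst[0]
--     poz_finala=0
--     i=1
--     while i<len(lst) and lst[i]==x:
--         i+=1
--     if i==len(lst):
--         i-=1
--     y=lst[i]
--     pozitie_y=i
--     while i<len(lst) and lst[i]==y:
--         i+=1
--     if i==len(lst):
--         i-=1
--     z=lst[i]
--     pozitie_z=i
--     while i<len(lst) and lst[i]==z: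
--         i+=1
--     poz_finala=i
--     lungime_maxima=poz_finala-poz_initiala
--     if i==len(lst):
--         poz_initiala=0
--         poz_finala=len(lst)
--     else:
--         while i<len(lst):
--             nr=lst[i]
--             pozitie_x=pozitie_y
--             pozitie_y=pozitie_z
--             pozitie_z=i
--             while i<len(lst) and lst[i]==nr:
--                 i+=1
--             if(i-pozitie_x>lungime_maxima):
--                 lungime_maxima=i-pozitie_x
--                 poz_finala=i
--                 poz_initiala=pozitie_x
--     for j in range(poz_initiala,poz_finala):
--         secventa.append(lst[j])
--     return secventa
-- ===== SOURCE B (Python) =====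
-- def proprietatea2(lst):
--     # run-length encode: runs of consecutive equal elements as (start, end) pairs
--     runs = []
--     start = 0
--     for i in range(1, len(lst)):
--         if lst[i] != lst[i - 1]:
--             runs.append((start, i))
--             start = i
--     runs.append((start, len(lst)))
--     if len(runs) <= 3:
--         return lst[:]
--     best_start, best_end = runs[0][0], runs[2][1]
--     for k in range(3, len(runs)):
--         s = runs[k - 2][0]
--         e = runs[k][1]
--         if e - s > best_end - best_start:
--             best_start, best_end = s, e
--     return lst[best_start:best_end]
-- ===== Notes on version B (the rewrite author's own statement) =====
-- stated objective: simpler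
-- what changed: A's ad-hoc scan juggling three run-start pointers and '-1' end adjustments is replaced by a clean decomposition: run-length-encode the list into (start, end) runs, return the whole list when there are at most 3 runs, otherwise slide a window of 3 consecutive runs keeping the earliest strict maximum.
import Mathlib
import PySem

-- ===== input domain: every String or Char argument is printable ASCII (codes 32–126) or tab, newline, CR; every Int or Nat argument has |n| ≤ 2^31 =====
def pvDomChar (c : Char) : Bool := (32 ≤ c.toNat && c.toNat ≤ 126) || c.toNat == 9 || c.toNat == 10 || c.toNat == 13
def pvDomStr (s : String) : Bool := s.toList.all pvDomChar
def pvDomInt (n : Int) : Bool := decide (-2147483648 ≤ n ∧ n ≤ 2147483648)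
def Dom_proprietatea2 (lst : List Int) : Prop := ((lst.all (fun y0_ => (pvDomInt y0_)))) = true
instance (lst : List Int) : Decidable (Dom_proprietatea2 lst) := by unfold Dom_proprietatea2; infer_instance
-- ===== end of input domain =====

-- B replaces A's hand-rolled three-pointer scan by a run-length encoding followed by a
-- sliding window of three runs (objective: simpler decomposition, same O(n) cost).

-- ===== PORT A =====
-- 'while i < len(lst) and lst[i] == v: i += 1' (indices are always in range under Pre_,
-- so lst[i] is ported as lst.getD i 0; the fuel argument lst.length - i only makes the
-- loop structurally recursive and never runs out while the guard holds)
def skipGo (lst : List Int) (v : Int) : Nat → Nat → Nat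
  | 0, i => i
  | fuel + 1, i =>
    if i < lst.length ∧ lst.getD i 0 = v then skipGo lst v fuel (i + 1) else i

def skipRun (lst : List Int) (v : Int) (i : Nat) : Nat := skipGo lst v (lst.length - i) i

-- the trailing 'while i < len(lst): …' loop of A (fuel as above)
def loopGo (lst : List Int) : Nat → Nat → Nat → Nat → Nat → Nat → Nat → Nat × Nat
  | 0, _, _, _, _, pi, pf => (pi, pf)
  | fuel + 1, i, py, pz, lm, pi, pf =>
    if i < lst.length then
      let nr := lst.getD i 0
      let px := py
      let i' := skipRun lst nr i
      if i' - px > lm then loopGo lst fuel i' pz i (i' - px) px i'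
      else loopGo lst fuel i' pz i lm pi pf
    else (pi, pf)

def loopA (lst : List Int) (i py pz lm pi pf : Nat) : Nat × Nat :=
  loopGo lst (lst.length - i) i py pz lm pi pf

def proprietatea2 (lst : List Int) : List Int :=
  let n := lst.length
  let x := lst.getD 0 0
  let i1 := skipRun lst x 1
  let i1' := if i1 = n then i1 - 1 else i1
  let y := lst.getD i1' 0
  let py := i1'
  let i2 := skipRun lst y i1'
  let i2' := if i2 = n then i2 - 1 else i2
  let z := lst.getD i2' 0
  let pz := i2'
  let i3 := skipRun lst z i2'
  let p := if i3 = n then (0, n) else loopA lst i3 py pz i3 0 i3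
  -- 'for j in range(poz_initiala, poz_finala): secventa.append(lst[j])'
  (List.range' p.1 (p.2 - p.1)).map (fun j => lst.getD j 0)

-- ===== PORT B =====
-- run-length encoding: 'for i in range(1, len(lst)): …' (nonnegative indices, ported over Nat)
def stepB (lst : List Int) (p : List (Nat × Nat) × Nat) (i : Nat) : List (Nat × Nat) × Nat :=
  if lst.getD i 0 ≠ lst.getD (i - 1) 0 then (p.1 ++ [(p.2, i)], i) else p

def runsB (lst : List Int) : List (Nat × Nat) :=
  let p := (List.range' 1 (lst.length - 1)).foldl (stepB lst) ([], 0)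
  p.1 ++ [(p.2, lst.length)]

-- the window step: compare runs k-2 .. k against the best window so far
def stepW (runs : List (Nat × Nat)) (b : Nat × Nat) (k : Nat) : Nat × Nat :=
  if (runs.getD k (0, 0)).2 - (runs.getD (k - 2) (0, 0)).1 > b.2 - b.1
  then ((runs.getD (k - 2) (0, 0)).1, (runs.getD k (0, 0)).2) else b

def proprietatea2_alt (lst : List Int) : List Int :=
  let runs := runsB lst
  if runs.length ≤ 3 then PySem.List.slice lst none none
  else
    let b0 := ((runs.getD 0 (0, 0)).1, (runs.getD 2 (0, 0)).2)
    let b := (List.range' 3 (runs.length - 3)).foldl (stepW runs) b0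
    PySem.List.slice lst (some (b.1 : Int)) (some (b.2 : Int))

-- ===== PRECONDITION & SPEC =====
-- A indexes the first element before anything else, so it raises IndexError on the empty list; Pre_ excludes exactly that.
def Pre_proprietatea2 (lst : List Int) : Prop := lst ≠ []
instance (lst : List Int) : Decidable (Pre_proprietatea2 lst) := by unfold Pre_proprietatea2; infer_instance
def pvWitness_proprietatea2 : List Int := ([1, 1, 2, 3, 3, 4])

def Spec_proprietatea2 (lst : List Int) (out : List Int) : Prop := out = proprietatea2_alt lst
instance (lst : List Int) (out : List Int) : Decidable (Spec_proprietatea2 lst out) := by unfold Spec_proprietatea2; infer_instance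

-- ===== CLAIM (what is proved, stated in full; the proofs are below) =====
def Claim_equal_proprietatea2 : Prop := ∀ (lst : List Int), Dom_proprietatea2 lst → Pre_proprietatea2 lst → Spec_proprietatea2 lst (proprietatea2 lst)

-- ===== LEMMAS AND PROOFS =====

theorem skipGo_ge (lst : List Int) (v : Int) :
    ∀ (f i : Nat), i ≤ skipGo lst v f i := by
  intro f
  induction f with
  | zero => intro i; exact le_refl i
  | succ f ih =>
    intro i
    simp only [skipGo]
    by_cases hc : i < lst.length ∧ lst.getD i 0 = v
    · rw [if_pos hc]; exact le_trans (Nat.le_succ i) (ih (i + 1))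
    · rw [if_neg hc]

theorem skipRun_ge (lst : List Int) (v : Int) (i : Nat) : i ≤ skipRun lst v i :=
  skipGo_ge lst v _ i

theorem skipGo_le (lst : List Int) (v : Int) :
    ∀ (f i : Nat), i ≤ lst.length → skipGo lst v f i ≤ lst.length := by
  intro f
  induction f with
  | zero => intro i h; exact h
  | succ f ih =>
    intro i h
    simp only [skipGo]
    by_cases hc : i < lst.length ∧ lst.getD i 0 = v
    · rw [if_pos hc]; exact ih (i + 1) hc.1
    · rw [if_neg hc]; exact h

theorem skipRun_le (lst : List Int) (v : Int) (i : Nat) (h : i ≤ lst.length) :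
    skipRun lst v i ≤ lst.length := skipGo_le lst v _ i h

theorem skipGo_irrel (lst : List Int) (v : Int) :
    ∀ (f1 f2 i : Nat), lst.length - i ≤ f1 → lst.length - i ≤ f2 →
      skipGo lst v f1 i = skipGo lst v f2 i := by
  intro f1
  induction f1 with
  | zero =>
    intro f2 i h1 h2
    match f2 with
    | 0 => rfl
    | f2 + 1 =>
      show skipGo lst v 0 i = skipGo lst v (f2 + 1) i
      simp only [skipGo]
      rw [if_neg (fun hc => absurd hc.1 (by omega))]
  | succ f1 ih =>
    intro f2 i h1 h2
    match f2 with
    | 0 =>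
      simp only [skipGo]
      rw [if_neg (fun hc => absurd hc.1 (by omega))]
    | f2 + 1 =>
      simp only [skipGo]
      by_cases hc : i < lst.length ∧ lst.getD i 0 = v
      · rw [if_pos hc, if_pos hc]
        exact ih f2 (i + 1) (by omega) (by omega)
      · rw [if_neg hc, if_neg hc]

theorem skipRun_unfold (lst : List Int) (v : Int) (i : Nat) :
    skipRun lst v i
      = if i < lst.length ∧ lst.getD i 0 = v then skipRun lst v (i + 1) else i := by
  by_cases hc : i < lst.length ∧ lst.getD i 0 = v
  · rw [if_pos hc]
    show skipGo lst v (lst.length - i) i = skipGo lst v (lst.length - (i + 1)) (i + 1)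
    have hlt := hc.1
    obtain ⟨k, hk⟩ : ∃ k, lst.length - i = k + 1 := ⟨lst.length - i - 1, by omega⟩
    rw [hk]
    simp only [skipGo]
    rw [if_pos hc]
    exact skipGo_irrel lst v k (lst.length - (i + 1)) (i + 1) (by omega) (by omega)
  · rw [if_neg hc]
    show skipGo lst v (lst.length - i) i = i
    match hh : lst.length - i with
    | 0 => rfl
    | k + 1 => simp only [skipGo]; rw [if_neg hc]

theorem skipRun_self_lt (lst : List Int) (i : Nat) (h : i < lst.length) :
    i < skipRun lst (lst.getD i 0) i := by
  rw [skipRun_unfold, if_pos ⟨h, rfl⟩]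
  exact Nat.lt_of_lt_of_le (Nat.lt_succ_self i) (skipRun_ge lst _ (i + 1))

theorem skipRun_eq_aux (lst : List Int) (v : Int) :
    ∀ (d i e : Nat), e - i = d → i ≤ e → e ≤ lst.length →
      (∀ j, i ≤ j → j < e → lst.getD j 0 = v) →
      (e = lst.length ∨ lst.getD e 0 ≠ v) → skipRun lst v i = e := by
  intro d
  induction d with
  | zero =>
    intro i e hd h1 h2 h3 h4
    have hie : i = e := by omega
    subst hie
    rw [skipRun_unfold]
    rcases h4 with h4 | h4
    · rw [if_neg (fun hc => absurd hc.1 (by omega))]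
    · rw [if_neg (fun hc => h4 hc.2)]
  | succ d ih =>
    intro i e hd h1 h2 h3 h4
    have hi : i < e := by omega
    rw [skipRun_unfold, if_pos ⟨by omega, h3 i (le_refl i) hi⟩]
    exact ih (i + 1) e (by omega) (by omega) h2 (fun j hj1 hj2 => h3 j (by omega) hj2) h4

theorem skipRun_eq (lst : List Int) (v : Int) (i : Nat) {e : Nat}
    (h1 : i ≤ e) (h2 : e ≤ lst.length)
    (h3 : ∀ j, i ≤ j → j < e → lst.getD j 0 = v)
    (h4 : e = lst.length ∨ lst.getD e 0 ≠ v) :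
    skipRun lst v i = e :=
  skipRun_eq_aux lst v (e - i) i e rfl h1 h2 h3 h4

theorem loopGo_irrel (lst : List Int) :
    ∀ (f1 f2 i py pz lm pi pf : Nat), lst.length - i ≤ f1 → lst.length - i ≤ f2 →
      loopGo lst f1 i py pz lm pi pf = loopGo lst f2 i py pz lm pi pf := by
  intro f1
  induction f1 with
  | zero =>
    intro f2 i py pz lm pi pf h1 h2
    match f2 with
    | 0 => rfl
    | f2 + 1 =>
      show loopGo lst 0 i py pz lm pi pf = loopGo lst (f2 + 1) i py pz lm pi pf
      simp only [loopGo]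
      rw [if_neg (by omega)]
  | succ f1 ih =>
    intro f2 i py pz lm pi pf h1 h2
    match f2 with
    | 0 =>
      simp only [loopGo]
      rw [if_neg (by omega)]
    | f2 + 1 =>
      simp only [loopGo]
      by_cases hlt : i < lst.length
      · rw [if_pos hlt, if_pos hlt]
        have hstep : i < skipRun lst (lst.getD i 0) i := skipRun_self_lt lst i hlt
        by_cases hgt : skipRun lst (lst.getD i 0) i - py > lm
        · rw [if_pos hgt, if_pos hgt]
          exact ih f2 _ _ _ _ _ _ (by omega) (by omega)
        · rw [if_neg hgt, if_neg hgt]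
          exact ih f2 _ _ _ _ _ _ (by omega) (by omega)
      · rw [if_neg hlt, if_neg hlt]

theorem loopA_unfold (lst : List Int) (i py pz lm pi pf : Nat) :
    loopA lst i py pz lm pi pf
      = if i < lst.length then
          (if skipRun lst (lst.getD i 0) i - py > lm
           then loopA lst (skipRun lst (lst.getD i 0) i) pz i
                  (skipRun lst (lst.getD i 0) i - py) py (skipRun lst (lst.getD i 0) i)
           else loopA lst (skipRun lst (lst.getD i 0) i) pz i lm pi pf)
        else (pi, pf) := by
  by_cases hlt : i < lst.length
  · rw [if_pos hlt]
    show loopGo lst (lst.length - i) i py pz lm pi pf = _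
    obtain ⟨k, hk⟩ : ∃ k, lst.length - i = k + 1 := ⟨lst.length - i - 1, by omega⟩
    rw [hk]
    simp only [loopGo]
    rw [if_pos hlt]
    have hstep := skipRun_self_lt lst i hlt
    by_cases hgt : skipRun lst (lst.getD i 0) i - py > lm
    · rw [if_pos hgt, if_pos hgt]
      exact loopGo_irrel lst k _ _ _ _ _ _ _ (by omega) (by omega)
    · rw [if_neg hgt, if_neg hgt]
      exact loopGo_irrel lst k _ _ _ _ _ _ _ (by omega) (by omega)
  · rw [if_neg hlt]
    show loopGo lst (lst.length - i) i py pz lm pi pf = (pi, pf)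
    match hh : lst.length - i with
    | 0 => rfl
    | k + 1 => simp only [loopGo]; rw [if_neg hlt]

-- the canonical run decomposition of lst starting at position s
def runsFrom (lst : List Int) (s : Nat) : List (Nat × Nat) :=
  if h : s < lst.length then
    (s, skipRun lst (lst.getD s 0) (s + 1)) :: runsFrom lst (skipRun lst (lst.getD s 0) (s + 1))
  else []
termination_by lst.length - s
decreasing_by
  exact Nat.sub_lt_sub_left h (Nat.lt_of_lt_of_le (Nat.lt_succ_self s) (skipRun_ge lst (lst.getD s 0) (s + 1)))

theorem runsFrom_nil_iff (lst : List Int) (s : Nat) :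
    runsFrom lst s = [] ↔ lst.length ≤ s := by
  constructor
  · intro he
    by_contra hlt
    rw [runsFrom, dif_pos (by omega : s < lst.length)] at he
    exact List.cons_ne_nil _ _ he
  · intro hle
    rw [runsFrom, dif_neg (by omega)]

theorem runsFrom_facts (lst : List Int) (s : Nat) :
    ∀ k, k < (runsFrom lst s).length →
      ((runsFrom lst s).getD k (0, 0)).1 < lst.length ∧
      ((runsFrom lst s).getD k (0, 0)).2
        = skipRun lst (lst.getD ((runsFrom lst s).getD k (0, 0)).1 0) ((runsFrom lst s).getD k (0, 0)).1 ∧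
      ((k + 1 < (runsFrom lst s).length ∧
          ((runsFrom lst s).getD (k + 1) (0, 0)).1 = ((runsFrom lst s).getD k (0, 0)).2) ∨
        (k + 1 = (runsFrom lst s).length ∧ ((runsFrom lst s).getD k (0, 0)).2 = lst.length)) := by
  fun_induction runsFrom lst s with
  | case2 s h =>
    intro k hk
    simp at hk
  | case1 s h ih =>
    set e := skipRun lst (lst.getD s 0) (s + 1) with he
    have hele : e ≤ lst.length := skipRun_le lst _ _ (by omega)
    intro k hk
    match k with
    | 0 =>
      refine ⟨h, ?_, ?_⟩
      · show e = skipRun lst (lst.getD s 0) s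
        rw [skipRun_unfold, if_pos ⟨h, rfl⟩]
      · by_cases hre : runsFrom lst e = []
        · right
          exact ⟨by simp [hre], by
            have := (runsFrom_nil_iff lst e).mp hre
            show e = lst.length
            omega⟩
        · left
          have hel : e < lst.length := by
            by_contra hc
            exact hre ((runsFrom_nil_iff lst e).mpr (by omega))
          have hlen : 0 < (runsFrom lst e).length := List.length_pos_iff.mpr hre
          refine ⟨by simp only [List.length_cons]; omega, ?_⟩
          show ((runsFrom lst e).getD 0 (0, 0)).1 = e
          rw [runsFrom, dif_pos hel]
          rfl
    | k + 1 =>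
      simp only [List.length_cons] at hk
      have := ih k (by omega)
      simp only [List.getD_cons_succ, List.length_cons]
      refine ⟨this.1, this.2.1, ?_⟩
      rcases this.2.2 with ⟨h1, h2⟩ | ⟨h1, h2⟩
      · exact Or.inl ⟨by omega, h2⟩
      · exact Or.inr ⟨by omega, h2⟩

theorem skipRun_last (lst : List Int) (hn : 0 < lst.length) :
    skipRun lst (lst.getD (lst.length - 1) 0) (lst.length - 1) = lst.length := by
  rw [skipRun_unfold, if_pos ⟨by omega, rfl⟩]
  have h : lst.length - 1 + 1 = lst.length := by omega
  rw [h, skipRun_unfold, if_neg (fun hc => absurd hc.1 (lt_irrefl _))]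

theorem foldB (lst : List Int) :
    ∀ (c i start : Nat) (acc : List (Nat × Nat)),
      lst.length - i = c → start < i → i ≤ lst.length →
      (∀ j, start ≤ j → j < i → lst.getD j 0 = lst.getD start 0) →
      ((List.range' i (lst.length - i)).foldl (stepB lst) (acc, start)).1
          ++ [(((List.range' i (lst.length - i)).foldl (stepB lst) (acc, start)).2, lst.length)]
        = acc ++ runsFrom lst start := by
  intro c
  induction c with
  | zero =>
    intro i start acc hc h1 h2 h3
    have hin : i = lst.length := by omega
    have hes : skipRun lst (lst.getD start 0) (start + 1) = lst.length :=
      skipRun_eq lst _ _ (by omega) (le_refl _)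
        (fun j hj1 hj2 => h3 j (by omega) (by omega)) (Or.inl rfl)
    rw [hc, runsFrom, dif_pos (by omega : start < lst.length), hes,
      (runsFrom_nil_iff lst lst.length).mpr (le_refl _)]
    simp
  | succ c ih =>
    intro i start acc hc h1 h2 h3
    have hilt : i < lst.length := by omega
    rw [hc, List.range'_succ, List.foldl_cons]
    have hstep : lst.length - (i + 1) = c := by omega
    by_cases hne : lst.getD i 0 ≠ lst.getD (i - 1) 0
    · have hni : lst.getD i 0 ≠ lst.getD start 0 := by
        rw [h3 (i - 1) (by omega) (by omega)] at hne; exact hne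
      have hsb : stepB lst (acc, start) i = (acc ++ [(start, i)], i) := by
        unfold stepB; rw [if_pos hne]
      rw [hsb, ← hstep]
      rw [ih (i + 1) i (acc ++ [(start, i)]) (by omega) (by omega) (by omega)
        (fun j hj1 hj2 => congrArg (fun t => lst.getD t 0) (by omega : j = i))]
      have hes : skipRun lst (lst.getD start 0) (start + 1) = i :=
        skipRun_eq lst _ _ (by omega) (by omega)
          (fun j hj1 hj2 => h3 j (by omega) (by omega)) (Or.inr hni)
      have hrs : runsFrom lst start = (start, i) :: runsFrom lst i := by
        rw [runsFrom, dif_pos (by omega : start < lst.length), hes]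
      rw [hrs]
      simp
    · have heq : lst.getD i 0 = lst.getD start 0 :=
        (not_not.mp hne).trans (h3 (i - 1) (by omega) (by omega))
      have hsb : stepB lst (acc, start) i = (acc, start) := by
        unfold stepB; rw [if_neg hne]
      rw [hsb, ← hstep]
      exact ih (i + 1) start acc (by omega) (by omega) (by omega)
        (fun j hj1 hj2 => by
          rcases Nat.lt_or_ge j i with hj | hj
          · exact h3 j hj1 hj
          · have : j = i := by omega
            rw [this]; exact heq)

theorem runsB_eq (lst : List Int) (h : lst ≠ []) : runsB lst = runsFrom lst 0 := by
  have hn : 0 < lst.length := List.length_pos_iff.mpr h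
  show (((List.range' 1 (lst.length - 1)).foldl (stepB lst) ([], 0)).1
      ++ [(((List.range' 1 (lst.length - 1)).foldl (stepB lst) ([], 0)).2, lst.length)]) = runsFrom lst 0
  have := foldB lst (lst.length - 1) 1 0 [] rfl (by omega) (by omega)
    (fun j hj1 hj2 => congrArg (fun t => lst.getD t 0) (by omega : j = 0))
  simpa using this

theorem mainLoop (lst : List Int) :
    ∀ (c t pi pf : Nat), 3 ≤ t → t ≤ (runsFrom lst 0).length → (runsFrom lst 0).length - t = c →
      loopA lst (((runsFrom lst 0).getD (t - 1) (0, 0)).2)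
          (((runsFrom lst 0).getD (t - 2) (0, 0)).1)
          (((runsFrom lst 0).getD (t - 1) (0, 0)).1) (pf - pi) pi pf
        = (List.range' t ((runsFrom lst 0).length - t)).foldl (stepW (runsFrom lst 0)) (pi, pf) := by
  intro c
  induction c with
  | zero =>
    intro t pi pf h3t htm hc
    have hlast := runsFrom_facts lst 0 (t - 1) (by omega)
    have hEnd : ((runsFrom lst 0).getD (t - 1) (0, 0)).2 = lst.length := by
      rcases hlast.2.2 with ⟨ha, _⟩ | ⟨_, hb⟩
      · omega
      · exact hb
    rw [hc, hEnd, loopA_unfold, if_neg (lt_irrefl _)]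
    simp
  | succ c ih =>
    intro t pi pf h3t htm hc
    have htlt : t < (runsFrom lst 0).length := by omega
    have hprev := runsFrom_facts lst 0 (t - 1) (by omega)
    have hcur := runsFrom_facts lst 0 t htlt
    have hchain : ((runsFrom lst 0).getD t (0, 0)).1 = ((runsFrom lst 0).getD (t - 1) (0, 0)).2 := by
      rcases hprev.2.2 with ⟨_, hb⟩ | ⟨ha, _⟩
      · have : t - 1 + 1 = t := by omega
        rw [this] at hb; exact hb
      · omega
    have hilt : ((runsFrom lst 0).getD (t - 1) (0, 0)).2 < lst.length := by
      rw [← hchain]; exact hcur.1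
    rw [loopA_unfold, if_pos hilt]
    have hskip : skipRun lst (lst.getD (((runsFrom lst 0).getD (t - 1) (0, 0)).2) 0)
        (((runsFrom lst 0).getD (t - 1) (0, 0)).2) = ((runsFrom lst 0).getD t (0, 0)).2 := by
      conv_rhs => rw [hcur.2.1]
      rw [hchain]
    rw [hc, List.range'_succ, List.foldl_cons]
    have hstepw : stepW (runsFrom lst 0) (pi, pf) t
        = if ((runsFrom lst 0).getD t (0, 0)).2 - ((runsFrom lst 0).getD (t - 2) (0, 0)).1 > pf - pi
          then (((runsFrom lst 0).getD (t - 2) (0, 0)).1, ((runsFrom lst 0).getD t (0, 0)).2)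
          else (pi, pf) := rfl
    simp only [hskip, hstepw]
    have ht1 : t + 1 - 2 = t - 1 := by omega
    have ht2 : t + 1 - 1 = t := by omega
    by_cases hgt : ((runsFrom lst 0).getD t (0, 0)).2 - ((runsFrom lst 0).getD (t - 2) (0, 0)).1 > pf - pi
    · rw [if_pos hgt, if_pos hgt]
      have := ih (t + 1) (((runsFrom lst 0).getD (t - 2) (0, 0)).1)
        (((runsFrom lst 0).getD t (0, 0)).2) (by omega) (by omega) (by omega)
      rw [ht1, ht2, hchain, show (runsFrom lst 0).length - (t + 1) = c from by omega] at this
      exact this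
    · rw [if_neg hgt, if_neg hgt]
      have := ih (t + 1) pi pf (by omega) (by omega) (by omega)
      rw [ht1, ht2, hchain, show (runsFrom lst 0).length - (t + 1) = c from by omega] at this
      exact this

theorem foldW_bounds (R : List (Nat × Nat)) (n : Nat) :
    ∀ (l : List Nat) (b : Nat × Nat), b.1 ≤ b.2 → b.2 ≤ n →
      (∀ k ∈ l, (R.getD (k - 2) (0, 0)).1 ≤ (R.getD k (0, 0)).2 ∧ (R.getD k (0, 0)).2 ≤ n) →
      (l.foldl (stepW R) b).1 ≤ (l.foldl (stepW R) b).2 ∧ (l.foldl (stepW R) b).2 ≤ n := by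
  intro l
  induction l with
  | nil => intro b h1 h2 _; exact ⟨h1, h2⟩
  | cons k l ih =>
    intro b h1 h2 hall
    simp only [List.foldl_cons]
    have hk := hall k (List.mem_cons_self ..)
    unfold stepW
    split
    · exact ih _ hk.1 hk.2 (fun j hj => hall j (List.mem_cons_of_mem _ hj))
    · exact ih _ h1 h2 (fun j hj => hall j (List.mem_cons_of_mem _ hj))

theorem map_getD_range' (lst : List Int) (a b : Nat) (h : a + b ≤ lst.length) :
    (List.range' a b).map (fun j => lst.getD j 0) = (lst.drop a).take b := by
  apply List.ext_getElem
  · simp; omega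
  · intro i h1 h2
    simp only [List.getElem_map, List.getElem_range', List.getElem_take, List.getElem_drop]
    have hlt : a + i < lst.length := by
      simp only [List.length_map, List.length_range'] at h1
      omega
    have h1i : a + 1 * i = a + i := by ring
    rw [h1i, List.getD_eq_getElem lst 0 hlt]

-- ===== VERDICT (by name: the statement is the Claim_ definition above) =====
theorem map_getD_range'_zero (lst : List Int) :
    (List.range' 0 lst.length).map (fun j => lst.getD j 0) = lst := by
  rw [map_getD_range' lst 0 lst.length (by omega)]
  simp

theorem proprietatea2_spec : Claim_equal_proprietatea2 := by
  intro lst _ hpre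
  unfold Spec_proprietatea2
  have hn : 0 < lst.length := List.length_pos_iff.mpr hpre
  have hRB := runsB_eq lst hpre
  set i1 := skipRun lst (lst.getD 0 0) 1 with hi1def
  have hR0 : runsFrom lst 0 = (0, i1) :: runsFrom lst i1 := by
    rw [runsFrom, dif_pos hn, hi1def]
  by_cases h1 : i1 = lst.length
  · -- a single run: A returns the whole list, B sees one run
    have hA : proprietatea2 lst = lst := by
      unfold proprietatea2
      dsimp only
      rw [← hi1def, h1, if_pos rfl, skipRun_last lst hn, if_pos rfl, skipRun_last lst hn,
        if_pos rfl]
      dsimp only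
      rw [Nat.sub_zero, map_getD_range'_zero]
    have hB : proprietatea2_alt lst = lst := by
      unfold proprietatea2_alt
      dsimp only
      rw [hRB, hR0, (runsFrom_nil_iff lst i1).mpr (le_of_eq h1.symm)]
      simp [PySem.List.slice_none_none]
    rw [hA, hB]
  · have hi1lt : i1 < lst.length := lt_of_le_of_ne (skipRun_le lst _ 1 (by omega)) h1
    set e2 := skipRun lst (lst.getD i1 0) (i1 + 1) with he2def
    have hskip2 : skipRun lst (lst.getD i1 0) i1 = e2 := by
      rw [skipRun_unfold, if_pos ⟨hi1lt, rfl⟩, he2def]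
    have hR1 : runsFrom lst i1 = (i1, e2) :: runsFrom lst e2 := by
      rw [runsFrom, dif_pos hi1lt, he2def]
    by_cases h2 : e2 = lst.length
    · -- two runs: both return the whole list
      have hA : proprietatea2 lst = lst := by
        unfold proprietatea2
        dsimp only
        rw [← hi1def, if_neg h1, hskip2, h2, if_pos rfl, skipRun_last lst hn, if_pos rfl]
        dsimp only
        rw [Nat.sub_zero, map_getD_range'_zero]
      have hB : proprietatea2_alt lst = lst := by
        unfold proprietatea2_alt
        dsimp only
        rw [hRB, hR0, hR1, (runsFrom_nil_iff lst e2).mpr (le_of_eq h2.symm)]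
        simp [PySem.List.slice_none_none]
      rw [hA, hB]
    · have he2lt : e2 < lst.length := lt_of_le_of_ne (skipRun_le lst _ _ (by omega)) h2
      set e3 := skipRun lst (lst.getD e2 0) (e2 + 1) with he3def
      have hskip3 : skipRun lst (lst.getD e2 0) e2 = e3 := by
        rw [skipRun_unfold, if_pos ⟨he2lt, rfl⟩, he3def]
      have hR2 : runsFrom lst e2 = (e2, e3) :: runsFrom lst e3 := by
        rw [runsFrom, dif_pos he2lt, he3def]
      by_cases h3 : e3 = lst.length
      · -- three runs: both return the whole list
        have hA : proprietatea2 lst = lst := by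
          unfold proprietatea2
          dsimp only
          rw [← hi1def, if_neg h1, hskip2, if_neg h2, hskip3, h3, if_pos rfl]
          dsimp only
          rw [Nat.sub_zero, map_getD_range'_zero]
        have hB : proprietatea2_alt lst = lst := by
          unfold proprietatea2_alt
          dsimp only
          rw [hRB, hR0, hR1, hR2, (runsFrom_nil_iff lst e3).mpr (le_of_eq h3.symm)]
          simp [PySem.List.slice_none_none]
        rw [hA, hB]
      · -- at least four runs: the sliding-window loop
        have he3lt : e3 < lst.length := lt_of_le_of_ne (skipRun_le lst _ _ (by omega)) h3
        have hR3 : runsFrom lst 0 = (0, i1) :: (i1, e2) :: (e2, e3) :: runsFrom lst e3 := by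
          rw [hR0, hR1, hR2]
        have hg0 : (runsFrom lst 0).getD 0 (0, 0) = (0, i1) := by rw [hR3]; rfl
        have hg1 : (runsFrom lst 0).getD 1 (0, 0) = (i1, e2) := by rw [hR3]; rfl
        have hg2 : (runsFrom lst 0).getD 2 (0, 0) = (e2, e3) := by rw [hR3]; rfl
        have hne3 : runsFrom lst e3 ≠ [] := fun hnil =>
          absurd ((runsFrom_nil_iff lst e3).mp hnil) (by omega)
        have hm4 : 4 ≤ (runsFrom lst 0).length := by
          rw [hR3]
          have := List.length_pos_iff.mpr hne3
          simp only [List.length_cons]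
          omega
        set P := (List.range' 3 ((runsFrom lst 0).length - 3)).foldl
          (stepW (runsFrom lst 0)) (0, e3) with hPdef
        have hmain := mainLoop lst ((runsFrom lst 0).length - 3) 3 0 e3 (le_refl 3)
          (by omega) rfl
        simp only [show (3 : Nat) - 1 = 2 from rfl, show (3 : Nat) - 2 = 1 from rfl,
          Nat.sub_zero] at hmain
        rw [hg1, hg2] at hmain
        dsimp only at hmain
        rw [← hPdef] at hmain
        have hall : ∀ k ∈ List.range' 3 ((runsFrom lst 0).length - 3),
            ((runsFrom lst 0).getD (k - 2) (0, 0)).1 ≤ ((runsFrom lst 0).getD k (0, 0)).2 ∧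
            ((runsFrom lst 0).getD k (0, 0)).2 ≤ lst.length := by
          intro k hk
          rw [List.mem_range'_1] at hk
          have hkm : k < (runsFrom lst 0).length := by omega
          have f0 := runsFrom_facts lst 0 (k - 2) (by omega)
          have f1 := runsFrom_facts lst 0 (k - 1) (by omega)
          have f2 := runsFrom_facts lst 0 k hkm
          have g0 : ((runsFrom lst 0).getD (k - 2) (0, 0)).1
              < ((runsFrom lst 0).getD (k - 2) (0, 0)).2 := by
            rw [f0.2.1]; exact skipRun_self_lt lst _ f0.1
          have g1 : ((runsFrom lst 0).getD (k - 1) (0, 0)).1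
              < ((runsFrom lst 0).getD (k - 1) (0, 0)).2 := by
            rw [f1.2.1]; exact skipRun_self_lt lst _ f1.1
          have hk1 : k - 2 + 1 = k - 1 := by omega
          have hk2 : k - 1 + 1 = k := by omega
          rw [hk1] at f0
          rw [hk2] at f1
          have c0 : ((runsFrom lst 0).getD (k - 1) (0, 0)).1
              = ((runsFrom lst 0).getD (k - 2) (0, 0)).2 := by
            rcases f0.2.2 with ⟨_, hb⟩ | ⟨ha, _⟩
            · exact hb
            · omega
          have c1 : ((runsFrom lst 0).getD k (0, 0)).1
              = ((runsFrom lst 0).getD (k - 1) (0, 0)).2 := by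
            rcases f1.2.2 with ⟨_, hb⟩ | ⟨ha, _⟩
            · exact hb
            · omega
          have g2 : ((runsFrom lst 0).getD k (0, 0)).1
              < ((runsFrom lst 0).getD k (0, 0)).2 := by
            rw [f2.2.1]; exact skipRun_self_lt lst _ f2.1
          have hle : ((runsFrom lst 0).getD k (0, 0)).2 ≤ lst.length := by
            rw [f2.2.1]; exact skipRun_le lst _ _ (le_of_lt f2.1)
          exact ⟨by omega, hle⟩
        have hPb := foldW_bounds (runsFrom lst 0) lst.length
          (List.range' 3 ((runsFrom lst 0).length - 3)) (0, e3)
          (Nat.zero_le e3) (le_of_lt he3lt) hall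
        rw [← hPdef] at hPb
        have hA : proprietatea2 lst
            = (List.range' P.1 (P.2 - P.1)).map (fun j => lst.getD j 0) := by
          unfold proprietatea2
          dsimp only
          rw [← hi1def, if_neg h1, hskip2, if_neg h2, hskip3, if_neg h3]
          rw [hmain]
        have hB : proprietatea2_alt lst
            = PySem.List.slice lst (some (P.1 : Int)) (some (P.2 : Int)) := by
          unfold proprietatea2_alt
          dsimp only
          rw [hRB]
          rw [if_neg (by omega)]
          rw [hg0, hg2]
        rw [hA, hB, PySem.List.slice_natCast,
          map_getD_range' lst P.1 (P.2 - P.1) (by omega)]
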